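-- pv_equiv track=rewrite | github.com/PhamMinhHiepIT2/LeetCodePractice | strong_password_checker.py | check_valid_consequence_char
-- ===== SOURCE A (Python) =====
-- def check_valid_consequence_char(password: str):
--     count = 0
--     s = ""
--     for c in password:
--         if not s or c != s[-1]:
--             s = c
--             count = 1
--         else:
--             s += c
--             count += 1
--         if count >= 3:
--             return False
--     return True
-- ===== SOURCE B (Python) =====
-- def check_valid_consequence_char(password: str):
--     return not any(a == b == c for a, b, c in zip(password, password[1:], password[2:]))
-- ===== Notes on version B (the rewrite author's own statement) =====
-- stated objective: idiomatic
-- what changed: Replaced the stateful last-char/run-counter loop with early return by a single expression that scans adjacent character triples (zip of the string with its two shifts) and negates any().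
import Mathlib
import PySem

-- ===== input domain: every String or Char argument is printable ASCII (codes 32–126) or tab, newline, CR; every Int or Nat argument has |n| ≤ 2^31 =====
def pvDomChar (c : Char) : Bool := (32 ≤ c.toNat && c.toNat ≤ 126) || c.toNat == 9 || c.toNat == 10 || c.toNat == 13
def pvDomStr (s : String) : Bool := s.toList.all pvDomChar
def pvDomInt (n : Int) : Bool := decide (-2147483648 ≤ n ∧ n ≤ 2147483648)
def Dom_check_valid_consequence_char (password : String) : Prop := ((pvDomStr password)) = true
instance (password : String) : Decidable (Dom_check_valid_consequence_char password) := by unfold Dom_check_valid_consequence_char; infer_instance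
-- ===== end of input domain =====

-- B replaces A's stateful run-counter loop with one scan over adjacent character triples (idiomatic; same cost).


-- ===== PORT A =====
-- the for-loop with state (count, s); early 'return False' is the 'false' branch, s[-1] is getLast!
def goA_check : List Char → Int → List Char → Bool
  | c :: rest, count, s =>
    let p : List Char × Int :=
      if s.isEmpty || !(c == s.getLast!) then ([c], 1) else (s ++ [c], count + 1)
    if p.2 ≥ 3 then false else goA_check rest p.2 p.1
  | [], _, _ => true

def check_valid_consequence_char (password : String) : Bool :=
  goA_check password.toList 0 []

-- ===== PORT B =====
-- Source B: not any(a == b == c for a, b, c in zip(password, password[1:], password[2:]))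
def check_valid_consequence_char_alt (password : String) : Bool :=
  !(((password.toList.zip (password.toList.drop 1)).zip (password.toList.drop 2)).any
      (fun p => p.1.1 == p.1.2 && p.1.2 == p.2))

-- ===== PRECONDITION & SPEC =====
def Spec_check_valid_consequence_char (password : String) (out : Bool) : Prop := out = check_valid_consequence_char_alt password
instance (password : String) (out : Bool) : Decidable (Spec_check_valid_consequence_char password out) := by unfold Spec_check_valid_consequence_char; infer_instance

-- ===== CLAIM (what is proved, stated in full; the proofs are below) =====
def Claim_equal_check_valid_consequence_char : Prop := ∀ (password : String), Dom_check_valid_consequence_char password → Spec_check_valid_consequence_char password (check_valid_consequence_char password)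

-- ===== LEMMAS AND PROOFS =====

-- 'some three consecutive equal chars' — both ports are characterised against this
def hasTriple : List Char → Bool
  | a :: b :: c :: r => (a == b && b == c) || hasTriple (b :: c :: r)
  | _ => false

theorem goA_cons (d : Char) (rest : List Char) (count : Int) (s : List Char) :
    goA_check (d :: rest) count s =
      (if s = [] ∨ ¬ d = s.getLast?.getD 'A' then goA_check rest 1 [d]
       else if 3 ≤ count + 1 then false else goA_check rest (count + 1) (s ++ [d])) := by
  by_cases h : s = [] ∨ ¬ d = s.getLast?.getD 'A'
  · simp [goA_check, h]
  · simp [goA_check, h]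

-- B's triple-zip any equals hasTriple
theorem anyTriple_eq : ∀ (l : List Char),
    (((l.zip (l.drop 1)).zip (l.drop 2)).any (fun p => p.1.1 == p.1.2 && p.1.2 == p.2))
      = hasTriple l
  | [] => by simp [hasTriple]
  | [a] => by simp [hasTriple]
  | [a, b] => by simp [hasTriple]
  | a :: b :: c :: r => by
    rw [show hasTriple (a :: b :: c :: r) = ((a == b && b == c) || hasTriple (b :: c :: r)) from rfl]
    rw [← anyTriple_eq (b :: c :: r)]
    simp [List.zip_cons_cons]

-- loop invariant: with a current run ending in c of length 1 (resp. 2), A's loop decides !hasTriple of the run's tail prepended to the remaining input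
theorem goA_run : ∀ (l : List Char) (c : Char) (s : List Char), s.getLast? = some c →
    goA_check l 1 s = !hasTriple (c :: l) ∧ goA_check l 2 s = !hasTriple (c :: c :: l)
  | [], c, s, hl => by simp [goA_check, hasTriple]
  | d :: rest, c, s, hl => by
    by_cases hdc : d = c
    · subst hdc
      have h1 := goA_run rest d (s ++ [d]) (by simp)
      have hcond : ¬ (s = [] ∨ ¬ d = s.getLast?.getD 'A') := by
        cases s with
        | nil => simp at hl
        | cons x t => simp [hl]
      rw [goA_cons, goA_cons, if_neg hcond, if_neg hcond]
      constructor
      · rw [if_neg (by norm_num), show (1:Int)+1 = 2 from by norm_num, h1.2]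
      · rw [if_pos (by norm_num)]
        simp [hasTriple]
    · have h1 := goA_run rest d [d] (by simp)
      have hcd : (c == d) = false := beq_eq_false_iff_ne.mpr (fun h => hdc h.symm)
      have htail : ∀ l', hasTriple (c :: d :: l') = hasTriple (d :: l') := by
        intro l'
        match l' with
        | [] => rfl
        | e :: r' =>
          calc hasTriple (c :: d :: e :: r') = ((c == d && d == e) || hasTriple (d :: e :: r')) := rfl
            _ = hasTriple (d :: e :: r') := by rw [hcd]; simp
      have hcond : s = [] ∨ ¬ d = s.getLast?.getD 'A' := Or.inr (by simp [hl, hdc])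
      rw [goA_cons, goA_cons, if_pos hcond, if_pos hcond]
      constructor
      · rw [h1.1, htail]
      · rw [h1.1]
        have h2 : hasTriple (c :: c :: d :: rest) = hasTriple (d :: rest) := by
          calc hasTriple (c :: c :: d :: rest) = ((c == c && c == d) || hasTriple (c :: d :: rest)) := rfl
            _ = hasTriple (c :: d :: rest) := by rw [hcd]; simp
            _ = hasTriple (d :: rest) := htail rest
        rw [h2]

theorem check_eq (l : List Char) : goA_check l 0 [] = !hasTriple l := by
  match l with
  | [] => simp [goA_check, hasTriple]
  | c :: rest =>
    rw [goA_cons, if_pos (Or.inl rfl)]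
    exact (goA_run rest c [c] (by simp)).1

-- ===== VERDICT (by name: the statement is the Claim_ definition above) =====
theorem check_valid_consequence_char_spec : Claim_equal_check_valid_consequence_char := by
  intro password _
  unfold Spec_check_valid_consequence_char check_valid_consequence_char check_valid_consequence_char_alt
  rw [check_eq, anyTriple_eq]
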